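-- pv_equiv track=rewrite | github.com/ray-project/ray | eugo/__dev_utils/eugo_fix_header_only.py | format_deps_block
-- ===== SOURCE A (Python) =====
-- EUGO_MANAGED_EXACT = {
--     "grpc",
--     "protobuf",
--     "flatbuffers",
--     "spdlog",
--     "msgpack_cxx",
--     "nlohmann_json",
--     "gflags",
--     "hiredis",
--     "hiredis_ssl",
--     "threads",
-- }
--
-- EUGO_MANAGED_PREFIXES = ("absl_", "boost_", "prometheus_cpp_", "opencensus_cpp_")
--
-- def is_eugo_managed(dep_name):
--     """Check if a dependency variable is Eugo-managed (external)."""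
--     if dep_name in EUGO_MANAGED_EXACT:
--         return True
--     return dep_name.startswith(EUGO_MANAGED_PREFIXES)
--
-- def classify_deps(deps_list):
--     """Split deps into (package_managed, eugo_managed)."""
--     pkg = []
--     eugo = []
--     for d in deps_list:
--         if is_eugo_managed(d):
--             eugo.append(d)
--         else:
--             pkg.append(d)
--     return pkg, eugo
--
-- def format_deps_block(indent, var_name, deps):
--     """Format a _dependencies = [...] block with section comments."""
--     pkg, eugo = classify_deps(deps)
--     lines = [f"{indent}{var_name} = ["]
--     if pkg and eugo:
--         lines.append(f"{indent}    # Package-managed")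
--         for d in pkg:
--             lines.append(f"{indent}    {d},")
--         lines.append(f"{indent}")
--         lines.append(f"{indent}    # Eugo-managed")
--         for d in eugo:
--             lines.append(f"{indent}    {d},")
--     elif pkg:
--         lines.append(f"{indent}    # Package-managed")
--         for d in pkg:
--             lines.append(f"{indent}    {d},")
--     elif eugo:
--         lines.append(f"{indent}    # Eugo-managed")
--         for d in eugo:
--             lines.append(f"{indent}    {d},")
--     lines.append(f"{indent}]")
--     return lines
-- ===== SOURCE B (Python) =====
-- EUGO_MANAGED_EXACT = {
--     "grpc",
--     "protobuf",
--     "flatbuffers",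
--     "spdlog",
--     "msgpack_cxx",
--     "nlohmann_json",
--     "gflags",
--     "hiredis",
--     "hiredis_ssl",
--     "threads",
-- }
--
-- EUGO_MANAGED_PREFIXES = ("absl_", "boost_", "prometheus_cpp_", "opencensus_cpp_")
--
--
-- def _managed(d):
--     return d in EUGO_MANAGED_EXACT or d.startswith(EUGO_MANAGED_PREFIXES)
--
--
-- def format_deps_block(indent, var_name, deps):
--     """Stable-sort deps by managed flag, then one scan emitting a header at each flag change."""
--     ordered = sorted(deps, key=_managed)  # stable: package-managed first, eugo-managed after
--     lines = [f"{indent}{var_name} = ["]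
--     prev = None
--     for d in ordered:
--         m = _managed(d)
--         if m != prev:
--             if prev is not None:
--                 lines.append(f"{indent}")
--             lines.append(f"{indent}    {'# Eugo-managed' if m else '# Package-managed'}")
--             prev = m
--         lines.append(f"{indent}    {d},")
--     lines.append(f"{indent}]")
--     return lines
-- ===== Notes on version B (the rewrite author's own statement) =====
-- stated objective: alternative
-- what changed: Replaces A's partition-into-two-lists plus three explicit branch cases by a stable sort on the managed flag followed by a single scan that emits a section header (and a blank separator) whenever the flag changes.
import Mathlib
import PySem

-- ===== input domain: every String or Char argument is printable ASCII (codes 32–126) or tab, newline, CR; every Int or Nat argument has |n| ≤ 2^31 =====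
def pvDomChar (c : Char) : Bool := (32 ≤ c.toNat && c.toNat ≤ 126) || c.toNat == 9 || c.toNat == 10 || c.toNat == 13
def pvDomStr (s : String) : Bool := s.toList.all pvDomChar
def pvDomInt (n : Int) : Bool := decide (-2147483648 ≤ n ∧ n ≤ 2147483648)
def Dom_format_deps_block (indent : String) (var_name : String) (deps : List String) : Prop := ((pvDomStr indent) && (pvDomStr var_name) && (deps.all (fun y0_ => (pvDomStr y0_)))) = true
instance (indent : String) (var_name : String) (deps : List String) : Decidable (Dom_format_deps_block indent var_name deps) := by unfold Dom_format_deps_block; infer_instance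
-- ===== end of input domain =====

-- B replaces A's partition-and-three-branches layout by a stable sort on the managed flag
-- followed by a single scan emitting a header (and blank separator) at each flag change
-- (objective: alternative).


-- ===== PORT A =====
def EUGO_MANAGED_EXACT : PySem.Set String :=
  PySem.Set.ofList ["grpc", "protobuf", "flatbuffers", "spdlog", "msgpack_cxx",
    "nlohmann_json", "gflags", "hiredis", "hiredis_ssl", "threads"]

def EUGO_MANAGED_PREFIXES : List String :=
  ["absl_", "boost_", "prometheus_cpp_", "opencensus_cpp_"]

def is_eugo_managed (dep_name : String) : Bool :=
  if PySem.Set.contains EUGO_MANAGED_EXACT dep_name then true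
  else EUGO_MANAGED_PREFIXES.any (fun p => PySem.Str.startswith dep_name p)

def classify_deps (deps_list : List String) : List String × List String :=
  deps_list.foldl
    (fun (acc : List String × List String) d =>
      if is_eugo_managed d then (acc.1, acc.2 ++ [d]) else (acc.1 ++ [d], acc.2))
    ([], [])

def format_deps_block (indent : String) (var_name : String) (deps : List String) : List String :=
  let pe := classify_deps deps
  let pkg := pe.1
  let eugo := pe.2
  let lines := [indent ++ var_name ++ " = ["]
  let lines :=
    if !pkg.isEmpty && !eugo.isEmpty then
      let lines := lines ++ [indent ++ "    # Package-managed"]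
      let lines := pkg.foldl (fun ls d => ls ++ [indent ++ "    " ++ d ++ ","]) lines
      let lines := lines ++ [indent]
      let lines := lines ++ [indent ++ "    # Eugo-managed"]
      eugo.foldl (fun ls d => ls ++ [indent ++ "    " ++ d ++ ","]) lines
    else if !pkg.isEmpty then
      let lines := lines ++ [indent ++ "    # Package-managed"]
      pkg.foldl (fun ls d => ls ++ [indent ++ "    " ++ d ++ ","]) lines
    else if !eugo.isEmpty then
      let lines := lines ++ [indent ++ "    # Eugo-managed"]
      eugo.foldl (fun ls d => ls ++ [indent ++ "    " ++ d ++ ","]) lines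
    else lines
  lines ++ [indent ++ "]"]

-- ===== PORT B =====
def bEugoExact : PySem.Set String :=
  PySem.Set.ofList ["grpc", "protobuf", "flatbuffers", "spdlog", "msgpack_cxx",
    "nlohmann_json", "gflags", "hiredis", "hiredis_ssl", "threads"]

def bEugoPrefixes : List String :=
  ["absl_", "boost_", "prometheus_cpp_", "opencensus_cpp_"]

def bManaged (d : String) : Bool :=
  PySem.Set.contains bEugoExact d || bEugoPrefixes.any (fun p => PySem.Str.startswith d p)

-- one step of B's scan: header (and separator) on a flag change, then the item line
def bStep (indent : String) (st : Option Bool × List String) (d : String) :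
    Option Bool × List String :=
  let m := bManaged d
  let st :=
    if st.1 ≠ some m then
      let ls := match st.1 with
        | none => st.2
        | some _ => st.2 ++ [indent]
      (some m, ls ++ [indent ++ "    " ++ (if m then "# Eugo-managed" else "# Package-managed")])
    else st
  (st.1, st.2 ++ [indent ++ "    " ++ d ++ ","])

def format_deps_block_alt (indent : String) (var_name : String) (deps : List String) : List String :=
  -- sorted(deps, key=_managed): stable, False (package) before True (eugo)
  let ordered := PySem.List.sorted deps (fun d => if bManaged d then (1 : Nat) else 0)
  let res := ordered.foldl (bStep indent) (none, [indent ++ var_name ++ " = ["])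
  res.2 ++ [indent ++ "]"]

-- ===== PRECONDITION & SPEC =====
def Spec_format_deps_block (indent : String) (var_name : String) (deps : List String) (out : List String) : Prop := out = format_deps_block_alt indent var_name deps
instance (indent : String) (var_name : String) (deps : List String) (out : List String) : Decidable (Spec_format_deps_block indent var_name deps out) := by unfold Spec_format_deps_block; infer_instance

-- ===== CLAIM =====
def Claim_equal_format_deps_block : Prop := ∀ (indent : String) (var_name : String) (deps : List String), Dom_format_deps_block indent var_name deps → Spec_format_deps_block indent var_name deps (format_deps_block indent var_name deps)

-- ===== LEMMAS AND PROOFS =====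

theorem managed_eq (d : String) : is_eugo_managed d = bManaged d := by
  unfold is_eugo_managed bManaged EUGO_MANAGED_EXACT bEugoExact EUGO_MANAGED_PREFIXES bEugoPrefixes
  cases h : PySem.Set.contains (PySem.Set.ofList ["grpc", "protobuf", "flatbuffers", "spdlog",
      "msgpack_cxx", "nlohmann_json", "gflags", "hiredis", "hiredis_ssl", "threads"]) d <;> simp

def kfn (d : String) : Nat := if bManaged d then 1 else 0

theorem insertBy_zero (x : String) (hx : bManaged x = false) (P E : List String)
    (hP : ∀ y ∈ P, bManaged y = false) (hE : ∀ y ∈ E, bManaged y = true) :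
    PySem.List.insertBy (fun a b => decide (kfn a < kfn b)) x (P ++ E) = P ++ x :: E := by
  induction P with
  | nil =>
    cases E with
    | nil => simp [PySem.List.insertBy]
    | cons e E' =>
      have he : bManaged e = true := hE e (by simp)
      simp [PySem.List.insertBy, kfn, hx, he]
  | cons p P' ih =>
    have hp : bManaged p = false := hP p (by simp)
    simp only [List.cons_append, PySem.List.insertBy]
    rw [if_neg (by simp [kfn, hx, hp])]
    rw [ih (fun y hy => hP y (by simp [hy]))]

theorem insertBy_one (x : String) (hx : bManaged x = true) (l : List String) :
    PySem.List.insertBy (fun a b => decide (kfn a < kfn b)) x l = l ++ [x] := by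
  apply PySem.List.insertBy_of_forall_not_before
  intro y _
  simp [kfn, hx]
  split <;> omega

theorem foldl_insertBy_partition (l : List String) (P E : List String)
    (hP : ∀ y ∈ P, bManaged y = false) (hE : ∀ y ∈ E, bManaged y = true) :
    l.foldl (fun acc x => PySem.List.insertBy (fun a b => decide (kfn a < kfn b)) x acc) (P ++ E)
      = (P ++ l.filter (fun d => !bManaged d)) ++ (E ++ l.filter (fun d => bManaged d)) := by
  induction l generalizing P E with
  | nil => simp
  | cons d t ih =>
    rw [List.foldl_cons]
    cases hd : bManaged d
    · rw [insertBy_zero d hd P E hP hE]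
      have h2 : P ++ d :: E = (P ++ [d]) ++ E := by simp
      have hP' : ∀ y ∈ P ++ [d], bManaged y = false := by
        intro y hy
        rcases List.mem_append.mp hy with h | h
        · exact hP y h
        · simp at h; subst h; exact hd
      rw [h2, ih (P ++ [d]) E hP' hE]
      simp [hd]
    · rw [insertBy_one d hd (P ++ E)]
      have h2 : P ++ E ++ [d] = P ++ (E ++ [d]) := by simp
      have hE' : ∀ y ∈ E ++ [d], bManaged y = true := by
        intro y hy
        rcases List.mem_append.mp hy with h | h
        · exact hE y h
        · simp at h; subst h; exact hd
      rw [h2, ih P (E ++ [d]) hP hE']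
      simp [hd]

theorem sorted_partition (deps : List String) :
    PySem.List.sorted deps (fun d => if bManaged d then (1 : Nat) else 0)
      = deps.filter (fun d => !bManaged d) ++ deps.filter (fun d => bManaged d) := by
  have h := PySem.List.sorted_eq_foldl_insertBy deps kfn
  have hk : (fun d => if bManaged d then (1 : Nat) else 0) = kfn := by
    funext d; simp [kfn]
  rw [hk, h]
  simpa using foldl_insertBy_partition deps [] [] (by simp) (by simp)

theorem scan_same (indent : String) (m : Bool) (l : List String)
    (hl : ∀ d ∈ l, bManaged d = m) (ls : List String) :
    l.foldl (bStep indent) (some m, ls)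
      = (some m, ls ++ l.map (fun d => indent ++ "    " ++ d ++ ",")) := by
  induction l generalizing ls with
  | nil => simp
  | cons d t ih =>
    have hd : bManaged d = m := hl d (by simp)
    have h1 : bStep indent (some m, ls) d = (some m, ls ++ [indent ++ "    " ++ d ++ ","]) := by
      simp [bStep, hd]
    rw [List.foldl_cons, h1, ih (fun y hy => hl y (by simp [hy]))]
    simp

theorem scan_group (indent : String) (m : Bool) (d : String) (t : List String)
    (hd : bManaged d = m) (ht : ∀ y ∈ t, bManaged y = m) (p : Option Bool) (hp : p ≠ some m)
    (ls : List String) :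
    (d :: t).foldl (bStep indent) (p, ls)
      = (some m,
          ls ++ (match p with | none => [] | some _ => [indent])
             ++ [indent ++ "    " ++ (if m then "# Eugo-managed" else "# Package-managed")]
             ++ (d :: t).map (fun x => indent ++ "    " ++ x ++ ",")) := by
  rw [List.foldl_cons]
  have h1 : bStep indent (p, ls) d
      = (some m, (ls ++ (match p with | none => [] | some _ => [indent])
          ++ [indent ++ "    " ++ (if m then "# Eugo-managed" else "# Package-managed")])
          ++ [indent ++ "    " ++ d ++ ","]) := by
    simp only [bStep, hd, if_pos hp]
    cases p <;> simp
  rw [h1, scan_same indent m t ht]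
  simp

theorem classify_eq_filter (deps : List String) :
    classify_deps deps
      = (deps.filter (fun d => !bManaged d), deps.filter (fun d => bManaged d)) := by
  unfold classify_deps
  suffices h : ∀ (l : List String) (p e : List String),
      l.foldl (fun (acc : List String × List String) d =>
          if is_eugo_managed d then (acc.1, acc.2 ++ [d]) else (acc.1 ++ [d], acc.2)) (p, e)
        = (p ++ l.filter (fun d => !bManaged d), e ++ l.filter (fun d => bManaged d)) by
    simpa using h deps [] []
  intro l
  induction l with
  | nil => intro p e; simp
  | cons x xs ih =>
    intro p e
    rw [List.foldl_cons]
    cases hx : is_eugo_managed x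
    · have hb : bManaged x = false := by rw [← managed_eq]; exact hx
      simp [hb, ih]
    · have hb : bManaged x = true := by rw [← managed_eq]; exact hx
      simp [hb, ih]

theorem mem_filter_not (deps : List String) (y : String)
    (hy : y ∈ deps.filter (fun d => !bManaged d)) : bManaged y = false := by
  simpa using (List.mem_filter.mp hy).2

theorem mem_filter_yes (deps : List String) (y : String)
    (hy : y ∈ deps.filter (fun d => bManaged d)) : bManaged y = true := by
  simpa using (List.mem_filter.mp hy).2

theorem flatten_map_singleton {α β : Type} (f : α → β) (l : List α) :
    (l.map (fun x => [f x])).flatten = l.map f := by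
  induction l with
  | nil => rfl
  | cons x xs ih => simp [ih]

theorem format_deps_block_eq (indent var_name : String) (deps : List String) :
    format_deps_block indent var_name deps = format_deps_block_alt indent var_name deps := by
  unfold format_deps_block format_deps_block_alt
  rw [classify_eq_filter, sorted_partition]
  have hP : ∀ y ∈ deps.filter (fun d => !bManaged d), bManaged y = false :=
    fun y hy => mem_filter_not deps y hy
  have hE : ∀ y ∈ deps.filter (fun d => bManaged d), bManaged y = true :=
    fun y hy => mem_filter_yes deps y hy
  revert hP hE
  generalize List.filter (fun d => !bManaged d) deps = pkg
  generalize List.filter (fun d => bManaged d) deps = eugo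
  intro hP hE
  dsimp only
  rw [List.foldl_append]
  cases pkg with
  | nil =>
    cases eugo with
    | nil => simp
    | cons e et =>
      simp only [List.foldl_nil]
      rw [scan_group indent true e et (hE e (by simp)) (fun y hy => hE y (by simp [hy])) none
          (by simp) _]
      simp [String.append_assoc, flatten_map_singleton]
  | cons p pt =>
    rw [scan_group indent false p pt (hP p (by simp)) (fun y hy => hP y (by simp [hy])) none
      (by simp) _]
    cases eugo with
    | nil =>
      simp only [List.foldl_nil]
      simp [String.append_assoc, flatten_map_singleton]
    | cons e et =>
      rw [scan_group indent true e et (hE e (by simp)) (fun y hy => hE y (by simp [hy]))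
        (some false) (by simp) _]
      simp [String.append_assoc, flatten_map_singleton]

-- ===== VERDICT =====
theorem format_deps_block_spec : Claim_equal_format_deps_block := by
  intro indent var_name deps _
  unfold Spec_format_deps_block
  exact format_deps_block_eq indent var_name deps
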